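-- pv_equiv track=rewrite | github.com/paulohenriquevn/lovedcrm | api/services/crm_lead_scoring_service.py | _calculate_company_size_score
-- ===== SOURCE A (Python) =====
-- from typing import Dict, List, Optional, Tuple
--
-- def _calculate_company_size_score(tags: Optional[List[str]]) -> int:
--     """Calculate company size score from tags."""
--     if not tags:
--         return 5  # Default neutral score
--
--     tags_lower = [tag.lower() for tag in tags]
--
--     # Enterprise indicators (25 points)
--     enterprise_tags = {"enterprise", "corporation", "multinacional", "holding"}
--     if any(tag in tags_lower for tag in enterprise_tags):
--         return 25
--
--     # Large company indicators (20 points)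
--     large_company_tags = {"grande_empresa", "corporation", "s.a.", "ltda"}
--     if any(tag in tags_lower for tag in large_company_tags):
--         return 20
--
--     # Medium company indicators (15 points)
--     medium_tags = {"media_empresa", "startup", "scale_up", "agencia"}
--     if any(tag in tags_lower for tag in medium_tags):
--         return 15
--
--     # Small business indicators (10 points)
--     small_tags = {"pequena_empresa", "mei", "freelancer", "pj"}
--     if any(tag in tags_lower for tag in small_tags):
--         return 10
--
--     return 8  # Unknown company size
-- ===== SOURCE B (Python) =====
-- _SCORE = {
--     "enterprise": 25, "corporation": 25, "multinacional": 25, "holding": 25,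
--     "grande_empresa": 20, "s.a.": 20, "ltda": 20,
--     "media_empresa": 15, "startup": 15, "scale_up": 15, "agencia": 15,
--     "pequena_empresa": 10, "mei": 10, "freelancer": 10, "pj": 10,
-- }
--
-- def _calculate_company_size_score(tags):
--     """Calculate company size score from tags."""
--     if not tags:
--         return 5  # Default neutral score
--     matched = [_SCORE[t] for t in (tag.lower() for tag in tags) if t in _SCORE]
--     return max(matched) if matched else 8
-- ===== Notes on version B (the rewrite author's own statement) =====
-- stated objective: simpler
-- what changed: Replaced four sequential set-membership scans with early returns by a single reverse-lookup dict (tag -> score, 'corporation' mapped to 25) and one pass over the lowered tags taking the maximum matched score, 8 if none matched.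
import Mathlib
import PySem

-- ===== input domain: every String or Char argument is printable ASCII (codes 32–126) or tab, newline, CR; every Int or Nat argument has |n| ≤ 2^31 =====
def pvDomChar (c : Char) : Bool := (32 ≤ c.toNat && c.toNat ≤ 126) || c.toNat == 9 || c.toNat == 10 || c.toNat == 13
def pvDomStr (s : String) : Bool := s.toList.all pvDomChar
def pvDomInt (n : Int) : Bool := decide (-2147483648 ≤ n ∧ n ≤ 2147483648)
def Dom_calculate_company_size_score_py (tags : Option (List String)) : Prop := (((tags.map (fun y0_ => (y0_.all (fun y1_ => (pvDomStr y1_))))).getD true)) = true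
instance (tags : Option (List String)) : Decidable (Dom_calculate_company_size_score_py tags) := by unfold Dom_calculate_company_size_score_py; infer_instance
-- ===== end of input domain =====

-- B replaces A's four sequential set-membership scans by one dict-indexed pass taking the
-- maximum matched score (objective: simpler; same return value everywhere).

-- ===== PORT A =====
def pvEnterpriseTags : PySem.Set String :=
  PySem.Set.ofList ["enterprise", "corporation", "multinacional", "holding"]
def pvLargeCompanyTags : PySem.Set String :=
  PySem.Set.ofList ["grande_empresa", "corporation", "s.a.", "ltda"]
def pvMediumTags : PySem.Set String :=
  PySem.Set.ofList ["media_empresa", "startup", "scale_up", "agencia"]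
def pvSmallTags : PySem.Set String :=
  PySem.Set.ofList ["pequena_empresa", "mei", "freelancer", "pj"]

def calculate_company_size_score_py (tags : Option (List String)) : Int :=
  match tags with
  | none => 5
  | some ts =>
    if ts = [] then 5
    else
      let tags_lower := ts.map PySem.Str.lower
      if pvEnterpriseTags.any (fun tag => tags_lower.contains tag) then 25
      else if pvLargeCompanyTags.any (fun tag => tags_lower.contains tag) then 20
      else if pvMediumTags.any (fun tag => tags_lower.contains tag) then 15
      else if pvSmallTags.any (fun tag => tags_lower.contains tag) then 10
      else 8

-- ===== PORT B =====
def pvScoreTable : PySem.Dict String Int := PySem.Dict.ofList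
  [("enterprise", 25), ("corporation", 25), ("multinacional", 25), ("holding", 25),
   ("grande_empresa", 20), ("s.a.", 20), ("ltda", 20),
   ("media_empresa", 15), ("startup", 15), ("scale_up", 15), ("agencia", 15),
   ("pequena_empresa", 10), ("mei", 10), ("freelancer", 10), ("pj", 10)]

def calculate_company_size_score_py_alt (tags : Option (List String)) : Int :=
  match tags with
  | none => 5
  | some ts =>
    if ts = [] then 5
    else
      let matched := (ts.map PySem.Str.lower).filterMap (fun t => pvScoreTable.get? t)
      match PySem.List.max? matched (fun y => y) with
      | some m => m
      | none => 8

-- ===== PRECONDITION & SPEC =====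
def Spec_calculate_company_size_score_py (tags : Option (List String)) (out : Int) : Prop := out = calculate_company_size_score_py_alt tags
instance (tags : Option (List String)) (out : Int) : Decidable (Spec_calculate_company_size_score_py tags out) := by unfold Spec_calculate_company_size_score_py; infer_instance

-- ===== CLAIM (what is proved, stated in full; the proofs are below) =====
def Claim_equal_calculate_company_size_score_py : Prop := ∀ (tags : Option (List String)), Dom_calculate_company_size_score_py tags → Spec_calculate_company_size_score_py tags (calculate_company_size_score_py tags)

-- ===== LEMMAS AND PROOFS =====

/-- `any(tag in tl for tag in L)` peeled one list element: membership of the head,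
or the same scan over the tail. -/
theorem pv_any_contains_cons (L : List String) (t : String) (tl : List String) :
    L.any (fun s => (t :: tl).contains s) = (L.contains t || L.any (fun s => tl.contains s)) := by
  rw [show ∀ a b : Bool, (a = b) ↔ (a = true ↔ b = true) from by decide]
  simp [List.any_eq_true]
  constructor
  · rintro ⟨s, hs, h | h⟩
    · subst h; exact Or.inl hs
    · exact Or.inr ⟨s, hs, h⟩
  · rintro (h | ⟨s, hs, h⟩)
    · exact ⟨t, h, Or.inl rfl⟩
    · exact ⟨s, hs, Or.inr h⟩

/-- Python `max` of a cons, in terms of the tail's max. -/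
theorem pv_max?_id_cons' (x : Int) (xs : List Int) :
    PySem.List.max? (x :: xs) (fun y => y) =
      some (match PySem.List.max? xs (fun y => y) with
            | none => x
            | some m => max x m) := by
  cases xs with
  | nil => simp [PySem.List.max?]
  | cons y t =>
    rw [PySem.List.max?_id_cons, PySem.List.max?_id_cons]
    simp only [List.foldl_cons]
    rw [List.foldl_assoc]

def pvF25 (tl : List String) : Bool := pvEnterpriseTags.any (fun s => tl.contains s)
def pvF20 (tl : List String) : Bool := pvLargeCompanyTags.any (fun s => tl.contains s)
def pvF20' (tl : List String) : Bool :=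
  (["grande_empresa", "s.a.", "ltda"] : List String).any (fun s => tl.contains s)
def pvF15 (tl : List String) : Bool := pvMediumTags.any (fun s => tl.contains s)
def pvF10 (tl : List String) : Bool := pvSmallTags.any (fun s => tl.contains s)

/-- B's max over the matched scores, characterised by which indicator tags occur. -/
theorem pv_key (tl : List String) :
    PySem.List.max? (tl.filterMap (fun t => pvScoreTable.get? t)) (fun y => y) =
      (if pvF25 tl then some 25
       else if pvF20' tl then some 20
       else if pvF15 tl then some 15
       else if pvF10 tl then some 10
       else none) := by
  induction tl with
  | nil => simp [pvF25, pvF20', pvF15, pvF10, pvEnterpriseTags, pvMediumTags, pvSmallTags,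
      PySem.List.max?]
  | cons t tl ih =>
    have e25 : pvF25 (t :: tl) = (pvEnterpriseTags.contains t || pvF25 tl) := by
      simpa [pvF25] using pv_any_contains_cons pvEnterpriseTags t tl
    have e20 : pvF20' (t :: tl)
        = ((["grande_empresa", "s.a.", "ltda"] : List String).contains t || pvF20' tl) := by
      simpa [pvF20'] using pv_any_contains_cons ["grande_empresa", "s.a.", "ltda"] t tl
    have e15 : pvF15 (t :: tl) = (pvMediumTags.contains t || pvF15 tl) := by
      simpa [pvF15] using pv_any_contains_cons pvMediumTags t tl
    have e10 : pvF10 (t :: tl) = (pvSmallTags.contains t || pvF10 tl) := by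
      simpa [pvF10] using pv_any_contains_cons pvSmallTags t tl
    by_cases h25 : t ∈ pvEnterpriseTags
    · have hs : pvScoreTable.get? t = some 25 := by
        simp [pvEnterpriseTags, PySem.Set.ofList] at h25
        rcases h25 with h | h | h | h <;> subst h <;> rfl
      have hf : pvF25 (t :: tl) = true := by rw [e25]; simp [h25]
      rw [List.filterMap_cons]; simp only [hs]
      rw [pv_max?_id_cons', ih, hf]
      split_ifs <;> simp_all
    · by_cases h20 : t ∈ (["grande_empresa", "s.a.", "ltda"] : List String)
      · have hs : pvScoreTable.get? t = some 20 := by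
          simp at h20
          rcases h20 with h | h | h <;> subst h <;> rfl
        have hf25 : pvF25 (t :: tl) = pvF25 tl := by rw [e25]; simp [h25]
        have hf : pvF20' (t :: tl) = true := by rw [e20]; simp [h20]
        rw [List.filterMap_cons]; simp only [hs]
        rw [pv_max?_id_cons', ih, hf25, hf]
        split_ifs <;> simp_all
      · by_cases h15 : t ∈ pvMediumTags
        · have hs : pvScoreTable.get? t = some 15 := by
            simp [pvMediumTags, PySem.Set.ofList] at h15
            rcases h15 with h | h | h | h <;> subst h <;> rfl
          have hf25 : pvF25 (t :: tl) = pvF25 tl := by rw [e25]; simp [h25]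
          have hf20 : pvF20' (t :: tl) = pvF20' tl := by rw [e20]; simp [h20]
          have hf : pvF15 (t :: tl) = true := by rw [e15]; simp [h15]
          rw [List.filterMap_cons]; simp only [hs]
          rw [pv_max?_id_cons', ih, hf25, hf20, hf]
          split_ifs <;> simp_all
        · by_cases h10 : t ∈ pvSmallTags
          · have hs : pvScoreTable.get? t = some 10 := by
              simp [pvSmallTags, PySem.Set.ofList] at h10
              rcases h10 with h | h | h | h <;> subst h <;> rfl
            have hf25 : pvF25 (t :: tl) = pvF25 tl := by rw [e25]; simp [h25]
            have hf20 : pvF20' (t :: tl) = pvF20' tl := by rw [e20]; simp [h20]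
            have hf15 : pvF15 (t :: tl) = pvF15 tl := by rw [e15]; simp [h15]
            have hf : pvF10 (t :: tl) = true := by rw [e10]; simp [h10]
            rw [List.filterMap_cons]; simp only [hs]
            rw [pv_max?_id_cons', ih, hf25, hf20, hf15, hf]
            split_ifs <;> simp_all
          · have hs : pvScoreTable.get? t = none := by
              simp [pvEnterpriseTags, PySem.Set.ofList] at h25
              simp at h20
              simp [pvMediumTags, PySem.Set.ofList] at h15
              simp [pvSmallTags, PySem.Set.ofList] at h10
              obtain ⟨n1, n2, n3, n4⟩ := h25
              obtain ⟨n5, n6, n7⟩ := h20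
              obtain ⟨n8, n9, n10, n11⟩ := h15
              obtain ⟨n12, n13, n14, n15⟩ := h10
              have hmk : pvScoreTable = PySem.Dict.mk
                  [("enterprise", 25), ("corporation", 25), ("multinacional", 25), ("holding", 25),
                   ("grande_empresa", 20), ("s.a.", 20), ("ltda", 20),
                   ("media_empresa", 15), ("startup", 15), ("scale_up", 15), ("agencia", 15),
                   ("pequena_empresa", 10), ("mei", 10), ("freelancer", 10), ("pj", 10)] := by decide
              simp [hmk, beq_iff_eq,
                Ne.symm n1, Ne.symm n2, Ne.symm n3, Ne.symm n4, Ne.symm n5, Ne.symm n6,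
                Ne.symm n7, Ne.symm n8, Ne.symm n9, Ne.symm n10, Ne.symm n11, Ne.symm n12,
                Ne.symm n13, Ne.symm n14, Ne.symm n15, PySem.Dict.get?]
            have hf25 : pvF25 (t :: tl) = pvF25 tl := by rw [e25]; simp [h25]
            have hf20 : pvF20' (t :: tl) = pvF20' tl := by rw [e20]; simp [h20]
            have hf15 : pvF15 (t :: tl) = pvF15 tl := by rw [e15]; simp [h15]
            have hf10 : pvF10 (t :: tl) = pvF10 tl := by rw [e10]; simp [h10]
            rw [List.filterMap_cons]; simp only [hs]
            rw [ih, hf25, hf20, hf15, hf10]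

/-- if no enterprise tag occurs then "corporation" does not occur, so A's large-company
check coincides with the corporation-free scan. -/
theorem pv_f20_of_not_f25 (tl : List String) (h : pvF25 tl = false) :
    pvF20 tl = pvF20' tl := by
  have hc : "corporation" ∉ tl := by
    simp [pvF25, pvEnterpriseTags, PySem.Set.ofList] at h
    exact h.2.1
  simp [pvF20, pvF20', pvLargeCompanyTags, PySem.Set.ofList, hc]

/-- the two branch-free cores agree on any (lowered) tag list. -/
theorem pv_core (tl : List String) :
    (if pvEnterpriseTags.any (fun tag => tl.contains tag) then (25 : Int)
     else if pvLargeCompanyTags.any (fun tag => tl.contains tag) then 20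
     else if pvMediumTags.any (fun tag => tl.contains tag) then 15
     else if pvSmallTags.any (fun tag => tl.contains tag) then 10
     else 8)
    = (match PySem.List.max? (tl.filterMap (fun t => pvScoreTable.get? t)) (fun y => y) with
       | some m => m
       | none => 8) := by
  show (if pvF25 tl then (25 : Int)
        else if pvF20 tl then 20
        else if pvF15 tl then 15
        else if pvF10 tl then 10
        else 8) = _
  rw [pv_key]
  by_cases h25 : pvF25 tl
  · simp [h25]
  · have h25' : pvF25 tl = false := by simpa using h25
    rw [pv_f20_of_not_f25 tl h25']
    simp only [h25', Bool.false_eq_true, if_false]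
    by_cases h20 : pvF20' tl
    · simp [h20]
    · simp only [h20, Bool.false_eq_true, if_false]
      by_cases h15 : pvF15 tl
      · simp [h15]
      · simp only [h15, Bool.false_eq_true, if_false]
        by_cases h10 : pvF10 tl <;> simp [h10]

-- ===== VERDICT (by name: the statement is the Claim_ definition above) =====
theorem calculate_company_size_score_py_spec : Claim_equal_calculate_company_size_score_py := by
  intro tags _
  unfold Spec_calculate_company_size_score_py
  unfold calculate_company_size_score_py calculate_company_size_score_py_alt
  match tags with
  | none => rfl
  | some ts =>
    by_cases hts : ts = []
    · simp [hts]
    · simp only [hts, if_false]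
      exact pv_core (ts.map PySem.Str.lower)
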